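-- pv_equiv track=rewrite | github.com/HWANG0316/Coding-Test | 약수의개수와덧셈.py | check
-- ===== SOURCE A (Python) =====
-- def check(num):
--     count = 0
--     for i in range(1,num + 1):
--         if num % i == 0:
--             count = count + 1
--     if count % 2 == 0:
--         return True
--     else:
--         return False
-- ===== SOURCE B (Python) =====
-- def check(num):
--     count = 0
--     i = 1
--     while i * i <= num:
--         if num % i == 0:
--             count += 1 if i * i == num else 2
--         i += 1
--     return count % 2 == 0
-- ===== Notes on version B (the rewrite author's own statement) =====
-- stated objective: faster
-- what changed: Counts divisors in pairs (d, num//d) with a while loop running only while i*i <= num instead of scanning every candidate divisor up to num.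
import Mathlib
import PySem

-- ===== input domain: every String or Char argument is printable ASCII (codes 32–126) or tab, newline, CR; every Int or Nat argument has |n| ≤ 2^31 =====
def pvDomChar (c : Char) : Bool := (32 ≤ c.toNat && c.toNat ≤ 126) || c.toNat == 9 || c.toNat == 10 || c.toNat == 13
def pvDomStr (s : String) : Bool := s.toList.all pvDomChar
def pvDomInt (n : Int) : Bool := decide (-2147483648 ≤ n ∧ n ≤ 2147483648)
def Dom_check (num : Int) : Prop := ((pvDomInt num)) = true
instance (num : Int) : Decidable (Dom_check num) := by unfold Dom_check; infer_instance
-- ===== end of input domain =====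

-- B counts divisors in pairs (i, num/i) while i*i ≤ num instead of scanning every candidate up to num (faster, measured).


-- ===== PORT A =====
def check (num : Int) : Bool :=
  let count : Int := (PySem.List.pyRange 1 (num + 1) 1).foldl
    (fun c i => if PySem.Int.mod num i == 0 then c + 1 else c) 0
  PySem.Int.mod count 2 == 0

-- ===== PORT B =====
-- the 'while i * i <= num' loop of Source B, carrying (i, count)
def checkLoop (num i count : Int) : Int :=
  if i * i ≤ num then
    checkLoop num (i + 1)
      (if PySem.Int.mod num i == 0 then (if i * i == num then count + 1 else count + 2) else count)
  else count
termination_by (num + 1 - i).toNat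
decreasing_by
  have h0 : 0 ≤ i * i := mul_self_nonneg i
  by_cases hi : i ≤ 0
  · omega
  · have : i ≤ i * i := by nlinarith
    omega

def check_alt (num : Int) : Bool :=
  PySem.Int.mod (checkLoop num 1 0) 2 == 0

-- ===== PRECONDITION & SPEC =====
def Spec_check (num : Int) (out : Bool) : Prop := out = check_alt num
instance (num : Int) (out : Bool) : Decidable (Spec_check num out) := by unfold Spec_check; infer_instance

-- ===== CLAIM (what is proved, stated in full; the proofs are below) =====
def Claim_equal_check : Prop := ∀ (num : Int), Dom_check num → Spec_check num (check num)

-- ===== LEMMAS AND PROOFS =====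

-- the set of divisors of num still to be counted when B's loop is at index i
def pvS (num i : Int) : Finset Int :=
  ((PySem.List.pyRange 1 (num + 1) 1).filter
    (fun d => decide (i ≤ d) && decide (d * i ≤ num) && decide (d ∣ num))).toFinset

lemma pvS_mem {num i d : Int} :
    d ∈ pvS num i ↔ (1 ≤ d ∧ d ≤ num) ∧ i ≤ d ∧ d * i ≤ num ∧ d ∣ num := by
  simp [pvS, PySem.List.mem_pyRange_one]
  omega

lemma pvS_empty {num i : Int} (h1 : 1 ≤ i) (h : num < i * i) : pvS num i = ∅ := by
  ext d
  simp only [pvS_mem, Finset.notMem_empty, iff_false]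
  rintro ⟨⟨hd1, _⟩, hid, hdi, _⟩
  nlinarith

-- a divisor d of num with d*i ≤ num < d*(i+1) must be num/i (with i ∣ num): num = d*q forces q = i
lemma pv_sandwich {num i d : Int} (hd1 : 1 ≤ d) (hdvd : d ∣ num)
    (hlo : d * i ≤ num) (hhi : num < d * (i + 1)) : num = d * i := by
  obtain ⟨q, hq⟩ := hdvd
  have hqi : q = i := by nlinarith
  rw [hq, hqi]

lemma pvS_step_ndvd {num i : Int} (h1 : 1 ≤ i) (_h : i * i ≤ num) (hd : ¬ i ∣ num) :
    pvS num i = pvS num (i + 1) := by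
  ext d
  simp only [pvS_mem]
  constructor
  · rintro ⟨hb, hid, hdi, hdvd⟩
    refine ⟨hb, ?_, ?_, hdvd⟩
    · rcases eq_or_lt_of_le hid with heq | hlt
      · exact absurd (heq ▸ hdvd) hd
      · omega
    · by_contra hgt
      push Not at hgt
      have hni := pv_sandwich hb.1 hdvd hdi hgt
      exact hd ⟨d, by rw [hni, mul_comm]⟩
  · rintro ⟨hb, hid, hdi, hdvd⟩
    exact ⟨hb, by omega, by nlinarith, hdvd⟩

lemma pvS_step_sq {num i : Int} (h1 : 1 ≤ i) (h : i * i = num) :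
    (pvS num i).card = (pvS num (i + 1)).card + 1 := by
  have hS : pvS num i = {i} := by
    ext d
    simp only [pvS_mem, Finset.mem_singleton]
    constructor
    · rintro ⟨⟨hd1, hdn⟩, hid, hdi, _⟩
      nlinarith
    · rintro rfl
      exact ⟨⟨h1, by nlinarith⟩, le_refl _, le_of_eq h, ⟨_, h.symm⟩⟩
  have hS' : pvS num (i + 1) = ∅ := by
    ext d
    simp only [pvS_mem, Finset.notMem_empty, iff_false]
    rintro ⟨⟨hd1, _⟩, hid, hdi, _⟩
    nlinarith
  rw [hS, hS']
  simp

lemma pvS_step_dvd {num i : Int} (h1 : 1 ≤ i) (h : i * i < num) (hd : i ∣ num) :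
    (pvS num i).card = (pvS num (i + 1)).card + 2 := by
  obtain ⟨q, hq⟩ := hd
  have hipos : 0 < i := h1
  have hq_gt : i < q := by nlinarith
  have hqdvd : q ∣ num := ⟨i, by linarith [hq, mul_comm i q]⟩
  have hidvd : i ∣ num := ⟨q, hq⟩
  have hS : pvS num i = insert i (insert q (pvS num (i + 1))) := by
    ext d
    simp only [pvS_mem, Finset.mem_insert]
    constructor
    · rintro ⟨⟨hd1, hdn⟩, hid, hdi, hdvd⟩
      by_cases hdi' : d = i
      · exact Or.inl hdi'
      right
      by_cases hdq : d * (i + 1) ≤ num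
      · exact Or.inr ⟨⟨hd1, hdn⟩, by omega, hdq, hdvd⟩
      · push Not at hdq
        left
        have hni : num = d * i := pv_sandwich hd1 hdvd hdi hdq
        have : d * i = i * q := by omega
        have : i * d = i * q := by linarith [mul_comm d i]
        exact mul_left_cancel₀ (by omega) this
    · rintro (rfl | rfl | ⟨hb, hid, hdi, hdvd⟩)
      · exact ⟨⟨h1, by nlinarith⟩, le_refl _, le_of_lt h, hidvd⟩
      · exact ⟨⟨by omega, by nlinarith⟩, by omega, le_of_eq (by linarith [mul_comm d i, hq]), hqdvd⟩
      · exact ⟨hb, by omega, by nlinarith, hdvd⟩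
  have hiq : i ≠ q := by omega
  have hi_not : i ∉ insert q (pvS num (i + 1)) := by
    simp only [Finset.mem_insert, pvS_mem]
    rintro (rfl | ⟨_, hid, _, _⟩)
    · omega
    · omega
  have hq_not : q ∉ pvS num (i + 1) := by
    simp only [pvS_mem]
    rintro ⟨_, hid, hdi, _⟩
    nlinarith [mul_comm i q]
  rw [hS, Finset.card_insert_of_notMem hi_not, Finset.card_insert_of_notMem hq_not]

lemma pvLoop_eq (num : Int) : ∀ (k : Nat) (i count : Int), (num + 1 - i).toNat ≤ k → 1 ≤ i →
    checkLoop num i count = count + ((pvS num i).card : Int) := by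
  intro k
  induction k with
  | zero =>
    intro i count hk h1
    rw [checkLoop]
    have hlt : num < i * i := by
      by_contra hge
      push Not at hge
      have : i ≤ i * i := by nlinarith
      omega
    rw [if_neg (not_le.mpr hlt), pvS_empty h1 hlt]
    simp
  | succ k ih =>
    intro i count hk h1
    rw [checkLoop]
    by_cases h : i * i ≤ num
    · rw [if_pos h]
      have hin : i ≤ num := by nlinarith
      have hrec := ih (i + 1) (if PySem.Int.mod num i == 0 then
          (if i * i == num then count + 1 else count + 2) else count) (by omega) (by omega)
      rw [hrec]
      by_cases hmod : i ∣ num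
      · by_cases hsq : i * i = num
        · have hcard := pvS_step_sq h1 hsq
          simp only [beq_iff_eq, (PySem.Int.mod_eq_zero_iff_dvd num i).mpr hmod, hsq,
            if_pos trivial, hcard]
          push_cast
          ring
        · have hcard := pvS_step_dvd h1 (lt_of_le_of_ne h hsq) hmod
          have hm : PySem.Int.mod num i = 0 := (PySem.Int.mod_eq_zero_iff_dvd num i).mpr hmod
          simp only [hm, hcard, beq_iff_eq, if_neg hsq]
          push_cast
          ring
      · have hm : PySem.Int.mod num i ≠ 0 :=
          fun hc => hmod ((PySem.Int.mod_eq_zero_iff_dvd num i).mp hc)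
        rw [pvS_step_ndvd h1 h hmod]
        simp [hm]
    · rw [if_neg h, pvS_empty h1 (by push Not at h; exact h)]
      simp

lemma pvCountA (num : Int) :
    (PySem.List.pyRange 1 (num + 1) 1).countP (fun i => PySem.Int.mod num i == 0)
      = (pvS num 1).card := by
  have hfc : (PySem.List.pyRange 1 (num + 1) 1).filter (fun i => PySem.Int.mod num i == 0)
      = (PySem.List.pyRange 1 (num + 1) 1).filter
        (fun d => decide (1 ≤ d) && decide (d * 1 ≤ num) && decide (d ∣ num)) := by
    apply List.filter_congr
    intro d hd
    have hb := PySem.List.mem_pyRange_one.mp hd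
    have hdn : d ≤ num := by omega
    simp only [mul_one, hb.1, hdn, decide_true, Bool.true_and]
    exact Bool.eq_iff_iff.mpr (by simp [PySem.Int.mod_eq_zero_iff_dvd])
  rw [List.countP_eq_length_filter, hfc, pvS,
    List.toFinset_card_of_nodup (((PySem.List.nodup_pyRange_one 1 (num + 1))).filter _)]

theorem check_spec : Claim_equal_check := by
  intro num _
  unfold Spec_check check check_alt
  rw [PySem.List.foldl_if_add_one, pvCountA,
    pvLoop_eq num (num + 1 - 1).toNat 1 0 (le_refl _) (le_refl _)]
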